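-- pv_equiv track=rewrite | github.com/Geunuk/n-puzzle | npuzzle.py | number_of_cycles
-- ===== SOURCE A (Python) =====
-- def number_of_cycles(s1, s2):
--     s1 = s1
--     s2 = s2
--
--     cnt = 0
--     cnt_list = list(range(len(s1))) # remaining index of s1
--     new_cycle_flag = True
--     total_cycle = []
--
--     while cnt_list:
--         if new_cycle_flag:
--             cycle = set()
--             total_cycle.append(cycle)
--
--         cnt_list.pop(cnt_list.index(cnt))
--         cycle.add(s1[cnt])
--
--         if s2[cnt] in cycle:
--             if cnt_list:
--                 cnt = cnt_list[0]
--             new_cycle_flag = True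
--         else:
--             if new_cycle_flag:
--                 new_cycle_flag = False
--             cnt = s1.index(s2[cnt])
--
--     return len(total_cycle)
-- ===== SOURCE B (Python) =====
-- def number_of_cycles(s1, s2):
--     # Count cycles of the permutation sigma(i) = index in s1 of s2[i] by counting
--     # cycle leaders: each i contributes 1 iff it is the minimal index on its cycle.
--     # No visited state, no start pointer: each index is decided independently by
--     # walking its cycle until an index <= i is met (a cycle has at most n elements,
--     # so n steps always suffice).
--     pos = {v: i for i, v in enumerate(s1)}
--     n = len(s1)
--     cycles = 0
--     for i in range(n):
--         j = pos[s2[i]]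
--         for _ in range(n):
--             if j <= i:
--                 break
--             j = pos[s2[j]]
--         if j == i:
--             cycles += 1
--     return cycles
-- ===== Notes on version B (the rewrite author's own statement) =====
-- stated objective: alternative
-- what changed: Replaces A's stateful traversal (remaining-index list mutated with list.index/pop, a new-cycle flag and a list of cycle sets) by the stateless cycle-leader count: a value->index dict built once, then each index i is decided independently, contributing 1 iff walking its cycle meets no index smaller than i.
-- outside the precondition, e.g. on number_of_cycles([1, 1], [1, 1]): A returns 2, B returns 1; on number_of_cycles([1, 2], [1, 1]): A returns 2, B returns 1
import Mathlib
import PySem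

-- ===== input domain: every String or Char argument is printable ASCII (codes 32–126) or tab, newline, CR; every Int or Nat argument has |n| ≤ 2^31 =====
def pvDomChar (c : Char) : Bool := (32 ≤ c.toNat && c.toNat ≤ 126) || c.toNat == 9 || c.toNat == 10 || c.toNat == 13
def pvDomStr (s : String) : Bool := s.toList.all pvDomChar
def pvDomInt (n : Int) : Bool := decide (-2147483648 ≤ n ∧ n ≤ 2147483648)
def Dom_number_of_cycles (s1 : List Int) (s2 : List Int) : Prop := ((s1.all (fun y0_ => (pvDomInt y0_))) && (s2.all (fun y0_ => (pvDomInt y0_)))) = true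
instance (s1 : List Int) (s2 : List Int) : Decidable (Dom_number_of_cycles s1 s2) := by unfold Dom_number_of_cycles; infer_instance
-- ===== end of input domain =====

-- B replaces A's stateful traversal (remaining-index list, new-cycle flag, growing cycle sets) by the stateless
-- cycle-leader count: each index contributes 1 iff it is minimal on its cycle (objective: alternative algorithm).

-- ===== PORT A =====
-- Python's total_cycle holds aliases of the mutated cycle sets; only its LENGTH is observable in the result,
-- so the port carries that length as the Int `total` (incremented exactly where Python appends).
def pvLoopA (s1 s2 : List Int) : Nat → Int → List Int → Bool → PySem.Set Int → Int → Option Int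
  | 0, _, cntList, _, _, total => if cntList.isEmpty then some total else none
  | fuel+1, cnt, cntList, flag, cyc, total =>
    if cntList.isEmpty then some total else
    -- if new_cycle_flag: cycle = set(); total_cycle.append(cycle)
    let cyc1 : PySem.Set Int := if flag then PySem.Set.empty else cyc
    let total1 : Int := if flag then total + 1 else total
    match PySem.List.index? cntList cnt with                      -- cnt_list.index(cnt)  (ValueError → none)
    | none => none
    | some i =>
      match PySem.List.pop? cntList (i : Int) with                -- cnt_list.pop(i)
      | none => none
      | some (_, cntList') =>
        match PySem.List.pyGet? s1 cnt with                       -- s1[cnt]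
        | none => none
        | some v1 =>
          let cyc2 := PySem.Set.add cyc1 v1                       -- cycle.add(s1[cnt])
          match PySem.List.pyGet? s2 cnt with                     -- s2[cnt]
          | none => none
          | some v2 =>
            if PySem.Set.contains cyc2 v2 then                    -- if s2[cnt] in cycle
              let cnt' := if cntList'.isEmpty then cnt else PySem.List.pyGetD cntList' 0 0
              pvLoopA s1 s2 fuel cnt' cntList' true cyc2 total1
            else
              match PySem.List.index? s1 v2 with                  -- cnt = s1.index(s2[cnt])  (ValueError → none)
              | none => none
              | some j => pvLoopA s1 s2 fuel (j : Int) cntList' false cyc2 total1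

def number_of_cycles (s1 : List Int) (s2 : List Int) : Int :=
  -- fuel = len(s1): each iteration pops one element of cnt_list
  (pvLoopA s1 s2 s1.length 0 (PySem.List.pyRange 0 s1.length 1) true PySem.Set.empty 0).getD 0

-- ===== PORT B =====
-- pos = {v: i for i, v in enumerate(s1)}
def pvPos (s1 : List Int) : PySem.Dict Int Int :=
  (PySem.List.enumerate s1 0).foldl (fun d p => d.insert p.2 p.1) PySem.Dict.empty

-- for _ in range(n): if j <= i: break; j = pos[s2[j]]   (the inner bounded walk;
-- lookups that would raise in Python return none)
def pvWalkB (s2 : List Int) (pos : PySem.Dict Int Int) (i : Int) : Nat → Int → Option Int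
  | 0, j => some j
  | f+1, j =>
    if i < j then
      match PySem.List.pyGet? s2 j with                           -- s2[j]
      | none => none
      | some v =>
        match pos.get? v with                                     -- pos[s2[j]]  (KeyError → none)
        | none => none
        | some j' => pvWalkB s2 pos i f j'
    else some j

-- body of the for-loop: j = pos[s2[i]]; while …; if j == i: cycles += 1
def pvStepB (s2 : List Int) (pos : PySem.Dict Int Int) (n : Nat) (acc : Option Int) (i : Nat) : Option Int :=
  match acc with
  | none => none
  | some c =>
    match PySem.List.pyGet? s2 (i : Int) with                     -- s2[i]
    | none => none
    | some v =>
      match pos.get? v with                                       -- pos[s2[i]]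
      | none => none
      | some j0 =>
        match pvWalkB s2 pos (i : Int) n j0 with
        | none => none
        | some j => some (if j = (i : Int) then c + 1 else c)

def number_of_cycles_alt (s1 : List Int) (s2 : List Int) : Int :=
  ((List.range s1.length).foldl (pvStepB s2 (pvPos s1) s1.length) (some 0)).getD 0

-- ===== PRECONDITION & SPEC =====
-- Pre_ excludes s1 with duplicate values and s2 whose first len(s1) entries are not distinct values of s1:
-- there A either raises (ValueError/IndexError) or its count is an accident of first-occurrence .index popping.
def Pre_number_of_cycles (s1 : List Int) (s2 : List Int) : Prop :=
  s1.Nodup ∧ s1.length ≤ s2.length ∧ (s2.take s1.length).Nodup ∧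
    ∀ v ∈ s2.take s1.length, v ∈ s1
instance (s1 : List Int) (s2 : List Int) : Decidable (Pre_number_of_cycles s1 s2) := by
  unfold Pre_number_of_cycles; infer_instance

def pvWitness_number_of_cycles : List Int × List Int := ([1, 2, 3, 4], [2, 3, 1, 4])

def Spec_number_of_cycles (s1 : List Int) (s2 : List Int) (out : Int) : Prop := out = number_of_cycles_alt s1 s2
instance (s1 : List Int) (s2 : List Int) (out : Int) : Decidable (Spec_number_of_cycles s1 s2 out) := by unfold Spec_number_of_cycles; infer_instance

-- ===== CLAIM (what is proved, stated in full; the proofs are below) =====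
def Claim_equal_number_of_cycles : Prop := ∀ (s1 : List Int) (s2 : List Int), Dom_number_of_cycles s1 s2 → Pre_number_of_cycles s1 s2 → Spec_number_of_cycles s1 s2 (number_of_cycles s1 s2)

-- ===== LEMMAS AND PROOFS =====

-- σ(i) = s1.index(s2[i]) : the successor function both programs follow.
def pvSig (s1 s2 : List Int) (x : Nat) : Nat := (PySem.List.index? s1 (s2.getD x 0)).getD 0

-- "i is minimal on its σ-orbit" (iterates up to len s1 cover the whole orbit, see pv_le_all).
def pvIsMinB (s1 s2 : List Int) (i : Nat) : Bool :=
  (List.range s1.length).all (fun k => decide (i ≤ (pvSig s1 s2)^[k] i))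

-- number of unvisited orbit minima: the cycles still to be counted.
def pvM (s1 s2 : List Int) (visited : List Bool) : Nat :=
  ((List.range s1.length).filter (fun i => !(visited.getD i false) && pvIsMinB s1 s2 i)).length

lemma pv_eraseIdx_append {α : Type} (pre suf : List α) (a : α) :
    (pre ++ a :: suf).eraseIdx pre.length = pre ++ suf := by
  induction pre with
  | nil => simp
  | cons x t ih => simp [ih]

lemma pv_take_getElem (s1 s2 : List Int) (hlen : s1.length ≤ s2.length) (x : Nat)
    (hx : x < s1.length) :
    ∃ hxt : x < (s2.take s1.length).length, (s2.take s1.length)[x] = s2.getD x 0 := by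
  have hx2 : x < s2.length := lt_of_lt_of_le hx hlen
  have hxt : x < (s2.take s1.length).length := by rw [List.length_take]; omega
  refine ⟨hxt, ?_⟩
  rw [List.getElem_take, List.getD_eq_getElem?_getD, List.getElem?_eq_getElem hx2]
  rfl

lemma pv_sig_spec (s1 s2 : List Int) (hlen : s1.length ≤ s2.length)
    (hnd2 : (s2.take s1.length).Nodup) (hsub : ∀ v ∈ s2.take s1.length, v ∈ s1) (x : Nat) (hx : x < s1.length) :
    PySem.List.index? s1 (s2.getD x 0) = some (pvSig s1 s2 x) ∧
    pvSig s1 s2 x < s1.length ∧ s1.getD (pvSig s1 s2 x) 0 = s2.getD x 0 := by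
  obtain ⟨hxt, heq⟩ := pv_take_getElem s1 s2 hlen x hx
  have hmem : s2.getD x 0 ∈ s1 := hsub _ (heq ▸ List.getElem_mem hxt)
  obtain ⟨k, hk⟩ := Option.isSome_iff_exists.mp ((PySem.List.index?_isSome_iff s1 _).mpr hmem)
  have hsig : pvSig s1 s2 x = k := by
    show (PySem.List.index? s1 (s2.getD x 0)).getD 0 = k
    rw [hk]
    rfl
  obtain ⟨hlt, hv, -⟩ := PySem.List.getElem_of_index?_eq_some hk
  refine ⟨by rw [hsig]; exact hk, by rw [hsig]; exact hlt, ?_⟩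
  rw [hsig, List.getD_eq_getElem?_getD, List.getElem?_eq_getElem hlt]
  exact hv

lemma pv_sig_inj (s1 s2 : List Int) (hnd : s1.Nodup) (hlen : s1.length ≤ s2.length)
    (hnd2 : (s2.take s1.length).Nodup) (hsub : ∀ v ∈ s2.take s1.length, v ∈ s1) (x y : Nat)
    (hx : x < s1.length) (hy : y < s1.length) (h : pvSig s1 s2 x = pvSig s1 s2 y) : x = y := by
  obtain ⟨-, hxl, hxv⟩ := pv_sig_spec s1 s2 hlen hnd2 hsub x hx
  obtain ⟨-, hyl, hyv⟩ := pv_sig_spec s1 s2 hlen hnd2 hsub y hy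
  obtain ⟨hxt, heqx⟩ := pv_take_getElem s1 s2 hlen x hx
  obtain ⟨hyt, heqy⟩ := pv_take_getElem s1 s2 hlen y hy
  have hval : (s2.take s1.length)[x] = (s2.take s1.length)[y] := by
    rw [heqx, heqy, ← hxv, ← hyv, h]
  exact (hnd2.getElem_inj_iff).mp hval

lemma pv_pos_get (s1 : List Int) (hnd : s1.Nodup) (v : Int) :
    (pvPos s1).get? v = Option.map (fun k : Nat => (k : Int)) (PySem.List.index? s1 v) := by
  revert hnd
  induction s1 using List.reverseRecOn with
  | nil =>
    intro _
    simp [pvPos, PySem.List.enumerate_nil, PySem.List.index?_eq_idxOf?, PySem.Dict.get?_empty]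
  | append_singleton l a ih =>
    intro hnd
    have hl : l.Nodup := (List.nodup_append.mp hnd).1
    have ha : a ∉ l := fun hmem => (List.nodup_append.mp hnd).2.2 a hmem a (by simp) rfl
    have hfold : pvPos (l ++ [a]) = (pvPos l).insert a ((0 : Int) + l.length) := by
      simp [pvPos, PySem.List.enumerate_append, List.foldl_append,
            PySem.List.enumerate_cons, PySem.List.enumerate_nil]
    rw [hfold, PySem.Dict.get?_insert]
    by_cases hva : v = a
    · subst hva
      rw [if_pos rfl, PySem.List.index?_append_singleton_self l v ha]
      simp
    · rw [if_neg hva, ih hl]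
      by_cases hvl : v ∈ l
      · rw [PySem.List.index?_append_of_mem [a] hvl]
      · rw [(PySem.List.index?_eq_none_iff l v).mpr hvl,
            (PySem.List.index?_eq_none_iff (l ++ [a]) v).mpr (by simp [hvl, hva])]

lemma pv_closed_back (n : Nat) (σ : Nat → Nat)
    (hinj : ∀ x, x < n → ∀ y, y < n → σ x = σ y → x = y)
    (P : Nat → Prop) [DecidablePred P] (hPn : ∀ x, P x → x < n) (hcl : ∀ x, P x → P (σ x)) :
    ∀ x, x < n → P (σ x) → P x := by
  intro x hx hPx
  set S : Finset Nat := (Finset.range n).filter P with hS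
  have hsub : S.image σ ⊆ S := by
    intro y hy
    simp only [hS, Finset.mem_image, Finset.mem_filter, Finset.mem_range] at hy ⊢
    obtain ⟨z, ⟨_, hz⟩, rfl⟩ := hy
    exact ⟨hPn _ (hcl z hz), hcl z hz⟩
  have hcard : (S.image σ).card = S.card := Finset.card_image_of_injOn (by
    intro a ha b hb hab
    simp only [hS, Finset.coe_filter, Finset.mem_range, Set.mem_setOf_eq] at ha hb
    exact hinj a ha.1 b hb.1 hab)
  have heq : S.image σ = S := Finset.eq_of_subset_of_card_le hsub (le_of_eq hcard.symm)
  have hmem : σ x ∈ S.image σ := by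
    rw [heq]
    simp only [hS, Finset.mem_filter, Finset.mem_range]
    exact ⟨hPn _ hPx, hPx⟩
  obtain ⟨y, hy, hxy⟩ := Finset.mem_image.mp hmem
  simp only [hS, Finset.mem_filter, Finset.mem_range] at hy
  exact hinj y hy.1 x hx hxy ▸ hy.2

lemma pv_getD_inj (s1 : List Int) (hnd : s1.Nodup) (a b : Nat) (ha : a < s1.length)
    (hb : b < s1.length) (h : s1.getD a 0 = s1.getD b 0) : a = b := by
  rw [List.getD_eq_getElem?_getD, List.getD_eq_getElem?_getD,
      List.getElem?_eq_getElem ha, List.getElem?_eq_getElem hb] at h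
  simp only [Option.getD_some] at h
  exact hnd.getElem_inj_iff.mp h

-- σ-iterates stay inside [0, len s1)
lemma pv_iter_lt (s1 s2 : List Int) (hlen : s1.length ≤ s2.length)
    (hnd2 : (s2.take s1.length).Nodup) (hsub : ∀ v ∈ s2.take s1.length, v ∈ s1) :
    ∀ (k x : Nat), x < s1.length → (pvSig s1 s2)^[k] x < s1.length := by
  intro k
  induction k with
  | zero => intro x hx; simpa using hx
  | succ k ih =>
    intro x hx
    rw [Function.iterate_succ_apply']
    exact (pv_sig_spec s1 s2 hlen hnd2 hsub _ (ih x hx)).2.1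

lemma pv_iter_inj (s1 s2 : List Int) (hnd : s1.Nodup) (hlen : s1.length ≤ s2.length)
    (hnd2 : (s2.take s1.length).Nodup) (hsub : ∀ v ∈ s2.take s1.length, v ∈ s1) :
    ∀ (a y z : Nat), y < s1.length → z < s1.length →
      (pvSig s1 s2)^[a] y = (pvSig s1 s2)^[a] z → y = z := by
  intro a
  induction a with
  | zero => intro y z _ _ h; simpa using h
  | succ a ih =>
    intro y z hy hz h
    rw [Function.iterate_succ_apply, Function.iterate_succ_apply] at h
    exact pv_sig_inj s1 s2 hnd hlen hnd2 hsub y z hy hz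
      (ih _ _ (pv_sig_spec s1 s2 hlen hnd2 hsub y hy).2.1
              (pv_sig_spec s1 s2 hlen hnd2 hsub z hz).2.1 h)

-- every point of [0, len s1) returns to itself within len s1 steps (pigeonhole)
lemma pv_period (s1 s2 : List Int) (hnd : s1.Nodup) (hlen : s1.length ≤ s2.length)
    (hnd2 : (s2.take s1.length).Nodup) (hsub : ∀ v ∈ s2.take s1.length, v ∈ s1)
    (x : Nat) (hx : x < s1.length) :
    ∃ p, 1 ≤ p ∧ p ≤ s1.length ∧ (pvSig s1 s2)^[p] x = x := by
  obtain ⟨a, ha, b, hb, hne, heq⟩ :=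
    Finset.exists_ne_map_eq_of_card_lt_of_maps_to
      (s := Finset.range (s1.length + 1)) (t := Finset.range s1.length)
      (by simp) (f := fun k => (pvSig s1 s2)^[k] x)
      (fun a _ => Finset.mem_range.mpr (pv_iter_lt s1 s2 hlen hnd2 hsub a x hx))
  simp only [Finset.mem_range] at ha hb
  rcases Nat.lt_or_ge a b with hab | hab
  · refine ⟨b - a, by omega, by omega, ?_⟩
    apply pv_iter_inj s1 s2 hnd hlen hnd2 hsub a _ _ (pv_iter_lt s1 s2 hlen hnd2 hsub _ x hx) hx
    rw [← Function.iterate_add_apply, Nat.add_sub_cancel' (le_of_lt hab)]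
    exact heq.symm
  · have hba : b < a := by omega
    refine ⟨a - b, by omega, by omega, ?_⟩
    apply pv_iter_inj s1 s2 hnd hlen hnd2 hsub b _ _ (pv_iter_lt s1 s2 hlen hnd2 hsub _ x hx) hx
    rw [← Function.iterate_add_apply, Nat.add_sub_cancel' (le_of_lt hba)]
    exact heq

lemma pv_iter_mod (s1 s2 : List Int) (x p : Nat) (hp : 1 ≤ p)
    (hfix : (pvSig s1 s2)^[p] x = x) :
    ∀ k, (pvSig s1 s2)^[k] x = (pvSig s1 s2)^[k % p] x := by
  intro k
  induction k using Nat.strong_induction_on with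
  | _ k ih =>
    by_cases hk : k < p
    · rw [Nat.mod_eq_of_lt hk]
    · have hkp : p ≤ k := by omega
      have h2 : (pvSig s1 s2)^[k] x = (pvSig s1 s2)^[k - p] x := by
        conv_lhs => rw [show k = (k - p) + p from by omega]
        rw [Function.iterate_add_apply, hfix]
      rw [h2, ih (k - p) (by omega)]
      congr 1
      exact (Nat.mod_eq_sub_mod hkp).symm

-- a bound valid on the first len s1 iterates is valid on all of them
lemma pv_le_all (s1 s2 : List Int) (hnd : s1.Nodup) (hlen : s1.length ≤ s2.length)
    (hnd2 : (s2.take s1.length).Nodup) (hsub : ∀ v ∈ s2.take s1.length, v ∈ s1)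
    (x c : Nat) (hx : x < s1.length) (h : ∀ k, k < s1.length → c ≤ (pvSig s1 s2)^[k] x) :
    ∀ k, c ≤ (pvSig s1 s2)^[k] x := by
  obtain ⟨p, hp1, hpn, hfix⟩ := pv_period s1 s2 hnd hlen hnd2 hsub x hx
  intro k
  rw [pv_iter_mod s1 s2 x p hp1 hfix k]
  exact h _ (lt_of_lt_of_le (Nat.mod_lt _ (by omega)) hpn)

lemma pv_isMinB_iff (s1 s2 : List Int) (i : Nat) :
    pvIsMinB s1 s2 i = true ↔ ∀ k, k < s1.length → i ≤ (pvSig s1 s2)^[k] i := by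
  simp [pvIsMinB, List.all_eq_true, List.mem_range]

lemma pv_getD_set (visited : List Bool) (cnt : Nat) (h : cnt < visited.length) (x : Nat) :
    (visited.set cnt true).getD x false = if cnt = x then true else visited.getD x false := by
  rw [List.getD_eq_getElem?_getD, List.getElem?_set]
  by_cases hcx : cnt = x
  · rw [if_pos hcx, if_pos hcx, if_pos (by omega)]
    rfl
  · rw [if_neg hcx, if_neg hcx, List.getD_eq_getElem?_getD]

-- counting: filters over range n that differ at exactly one true→false point
lemma pv_filter_length_except (n a : Nat) (p q : Nat → Bool) (ha : a < n)
    (h : ∀ i, i ≠ a → p i = q i) (hpa : p a = true) (hqa : q a = false) :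
    ((List.range n).filter p).length = ((List.range n).filter q).length + 1 := by
  induction n with
  | zero => omega
  | succ m ih =>
    rw [List.range_succ, List.filter_append, List.filter_append,
        List.length_append, List.length_append]
    by_cases ham : a = m
    · have hcongr : (List.range m).filter p = (List.range m).filter q :=
        List.filter_congr (fun i hi => h i (by have := List.mem_range.mp hi; omega))
      subst ham
      rw [hcongr]
      simp [hpa, hqa]
    · have ham' : a < m := by omega
      have hm : p m = q m := h m (by omega)
      rw [ih ham']
      simp only [List.filter_cons, List.filter_nil, hm]
      omega

lemma pv_M_set_true (s1 s2 : List Int) (visited : List Bool) (cnt : Nat)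
    (hc : cnt < s1.length) (hlenv : visited.length = s1.length)
    (hv : visited.getD cnt false = false) (hm : pvIsMinB s1 s2 cnt = true) :
    pvM s1 s2 visited = pvM s1 s2 (visited.set cnt true) + 1 := by
  apply pv_filter_length_except s1.length cnt _ _ hc
  · intro i hi
    rw [pv_getD_set visited cnt (by omega) i, if_neg (fun h => hi h.symm)]
  · rw [hv, hm]
    rfl
  · rw [pv_getD_set visited cnt (by omega) cnt, if_pos rfl]
    rfl

lemma pv_M_set_false (s1 s2 : List Int) (visited : List Bool) (cnt : Nat)
    (hc : cnt < s1.length) (hlenv : visited.length = s1.length)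
    (hm : pvIsMinB s1 s2 cnt = false) :
    pvM s1 s2 visited = pvM s1 s2 (visited.set cnt true) := by
  unfold pvM
  congr 1
  apply List.filter_congr
  intro i _
  rw [pv_getD_set visited cnt (by omega) i]
  by_cases hci : cnt = i
  · subst hci
    rw [if_pos rfl, hm]
    simp
  · rw [if_neg hci]

lemma pv_M_zero (s1 s2 : List Int) (visited : List Bool)
    (h : ∀ i, i < s1.length → visited.getD i false = true) :
    pvM s1 s2 visited = 0 := by
  unfold pvM
  rw [List.filter_eq_nil_iff.mpr]
  · rfl
  · intro i hi
    rw [h i (List.mem_range.mp hi)]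
    simp

-- the head of a filtered range is its least element
lemma pv_filter_range_head_least (n : Nat) (p : Nat → Bool) (r : Nat)
    (h : ((List.range n).filter p).head? = some r) :
    r < n ∧ p r = true ∧ ∀ x, x < n → p x = true → r ≤ x := by
  have hpw : ((List.range n).filter p).Pairwise (· < ·) :=
    List.Pairwise.sublist List.filter_sublist List.pairwise_lt_range
  have hmem : r ∈ (List.range n).filter p := by
    cases hl : (List.range n).filter p with
    | nil => rw [hl] at h; simp at h
    | cons a t => rw [hl] at h; simp at h; simp [h]
  obtain ⟨hr1, hr2⟩ := List.mem_filter.mp hmem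
  refine ⟨List.mem_range.mp hr1, hr2, ?_⟩
  intro x hx hpx
  have hxmem : x ∈ (List.range n).filter p :=
    List.mem_filter.mpr ⟨List.mem_range.mpr hx, hpx⟩
  cases hl : (List.range n).filter p with
  | nil => rw [hl] at hxmem; simp at hxmem
  | cons a t =>
    rw [hl] at h hxmem hpw
    simp only [List.head?_cons, Option.some_inj] at h
    subst h
    rcases List.mem_cons.mp hxmem with h | h
    · omega
    · exact le_of_lt ((List.pairwise_cons.mp hpw).1 x h)

-- The invariant for A's loop: visited is the ghost complement of cnt_list, C the indices of the
-- current open cycle, and hmin records that the open cycle's minimum is cnt (flag) or already visited.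
structure PvInv (s1 s2 : List Int) (cnt : Nat) (cl : List Int) (flag : Bool) (cyc : PySem.Set Int)
    (visited : List Bool) (C : List Nat) : Prop where
  hlen : visited.length = s1.length
  hcl : cl = List.map (fun i : Nat => (i : Int)) ((List.range s1.length).filter (fun i => !(visited.getD i false)))
  hC : ∀ c ∈ C, c < s1.length ∧ visited.getD c false = true
  hchain : ∀ c ∈ C, pvSig s1 s2 c ∈ C ∨ pvSig s1 s2 c = cnt
  hflagC : flag = true → C = []
  hcyc : flag = false → ∀ v, (PySem.Set.contains cyc v = true ↔ ∃ c ∈ C, s1.getD c 0 = v)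
  hV : ∀ x, x < s1.length → visited.getD x false = true → x ∉ C →
        (visited.getD (pvSig s1 s2 x) false = true ∧ pvSig s1 s2 x ∉ C)
  hcnt : cnt < s1.length
  hcntvis : visited.getD cnt false = false
  hmin : if flag = true
         then (∀ k, k < s1.length → cnt ≤ (pvSig s1 s2)^[k] cnt)
         else (∃ r, r < s1.length ∧ visited.getD r false = true ∧
               (∃ s, s < s1.length ∧ (pvSig s1 s2)^[s] cnt = r) ∧
               (∀ k, k < s1.length → r ≤ (pvSig s1 s2)^[k] cnt))

-- A's loop returns total + (number of unvisited orbit minima): each remaining cycle contributes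
-- exactly one, at the moment its minimal index starts a new cycle.
lemma pv_count (s1 s2 : List Int) (hnd : s1.Nodup) (hlen : s1.length ≤ s2.length)
    (hnd2 : (s2.take s1.length).Nodup) (hsub : ∀ v ∈ s2.take s1.length, v ∈ s1) :
    ∀ (k : Nat) (cntA : Int) (cl : List Int) (flag : Bool) (cyc : PySem.Set Int)
      (total : Int) (visited : List Bool),
      cl.length = k →
      ((cl = [] ∧ pvM s1 s2 visited = 0) ∨
        (∃ cnt : Nat, cntA = (cnt : Int) ∧
          ∃ C : List Nat, PvInv s1 s2 cnt cl flag cyc visited C)) →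
      pvLoopA s1 s2 k cntA cl flag cyc total = some (total + (pvM s1 s2 visited : Int)) := by
  intro k
  induction k with
  | zero =>
    intro cntA cl flag cyc total visited hk hdisj
    have hcl0 : cl = [] := List.length_eq_zero_iff.mp hk
    rcases hdisj with ⟨-, hM0⟩ | ⟨cnt, -, C, inv⟩
    · subst hcl0
      simp [pvLoopA, hM0]
    · exfalso
      have hmemcl : (cnt : Int) ∈ cl := by
        rw [inv.hcl]
        simp only [List.mem_map, List.mem_filter, List.mem_range]
        exact ⟨cnt, ⟨inv.hcnt, by rw [inv.hcntvis]; rfl⟩, rfl⟩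
      rw [hcl0] at hmemcl
      exact absurd hmemcl (List.not_mem_nil)
  | succ k IH =>
    intro cntA cl flag cyc total visited hk hdisj
    rcases hdisj with ⟨hcl0, -⟩ | ⟨cnt, rfl, C, inv⟩
    · rw [hcl0] at hk; simp at hk
    have hclne : cl ≠ [] := by intro h; rw [h] at hk; simp at hk
    have hvlen : visited.length = s1.length := inv.hlen
    have hcntv : cnt < visited.length := by rw [hvlen]; exact inv.hcnt
    have hn0 : 0 < s1.length := lt_of_le_of_lt (Nat.zero_le _) inv.hcnt
    -- the values read in this iteration
    obtain ⟨hsgidx, hsglt, hsgval⟩ := pv_sig_spec s1 s2 hlen hnd2 hsub cnt inv.hcnt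
    have hget1 : PySem.List.pyGet? s1 (cnt : Int) = some (s1.getD cnt 0) := by
      rw [PySem.List.pyGet?_natCast, List.getElem?_eq_getElem inv.hcnt,
          List.getD_eq_getElem?_getD, List.getElem?_eq_getElem inv.hcnt]
      rfl
    have hcnt2 : cnt < s2.length := lt_of_lt_of_le inv.hcnt hlen
    have hget2 : PySem.List.pyGet? s2 (cnt : Int) = some (s2.getD cnt 0) := by
      rw [PySem.List.pyGet?_natCast, List.getElem?_eq_getElem hcnt2,
          List.getD_eq_getElem?_getD, List.getElem?_eq_getElem hcnt2]
      rfl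
    -- cnt is in cnt_list; pop it
    have hmemcl : (cnt : Int) ∈ cl := by
      rw [inv.hcl]
      simp only [List.mem_map, List.mem_filter, List.mem_range]
      exact ⟨cnt, ⟨inv.hcnt, by rw [inv.hcntvis]; rfl⟩, rfl⟩
    obtain ⟨i, hi⟩ := Option.isSome_iff_exists.mp
      ((PySem.List.index?_isSome_iff cl ((cnt : Nat) : Int)).mpr hmemcl)
    obtain ⟨hilt, -, -⟩ := PySem.List.getElem_of_index?_eq_some hi
    obtain ⟨pre, suf, hdecomp, hprelen, hprenot⟩ :=
      (PySem.List.index?_eq_some_iff cl ((cnt : Nat) : Int) i).mp hi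
    have heidx : cl.eraseIdx i = cl.erase ((cnt : Nat) : Int) := by
      rw [hdecomp, ← hprelen, pv_eraseIdx_append, List.erase_append_right _ hprenot,
          List.erase_cons_head]
    have hgetD' : ∀ x : Nat, (visited.set cnt true).getD x false =
        (if cnt = x then true else visited.getD x false) := pv_getD_set visited cnt hcntv
    have hmono : ∀ y, visited.getD y false = true → (visited.set cnt true).getD y false = true := by
      intro y h
      rw [hgetD' y]
      split_ifs
      · rfl
      · exact h
    have hviscnt' : (visited.set cnt true).getD cnt false = true := by
      rw [hgetD' cnt, if_pos rfl]
    have hclE : cl.eraseIdx i =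
        List.map (fun i : Nat => (i : Int))
          ((List.range s1.length).filter (fun x => !((visited.set cnt true).getD x false))) := by
      rw [heidx, inv.hcl,
          ← List.map_erase (f := fun i : Nat => (i : Int)) (fun a b h => by simpa using h)]
      congr 1
      rw [((List.nodup_range).filter _).erase_eq_filter cnt, List.filter_filter]
      apply List.filter_congr
      intro x _
      show ((x != cnt) && !(visited.getD x false)) = !((visited.set cnt true).getD x false)
      rw [hgetD' x]
      by_cases hxc : cnt = x
      · subst hxc
        rw [if_pos rfl, inv.hcntvis]
        simp
      · rw [if_neg hxc]
        simp [Ne.symm hxc]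
    have hcl'len : (cl.eraseIdx i).length = k := by
      rw [List.length_eraseIdx_of_lt hilt, hk]
      omega
    have hvlen' : (visited.set cnt true).length = s1.length := by
      rw [List.length_set]; exact hvlen
    -- one step of A
    have hAstep : pvLoopA s1 s2 (k+1) ((cnt : Nat) : Int) cl flag cyc total =
        (if PySem.Set.contains
              (PySem.Set.add (if flag then PySem.Set.empty else cyc) (s1.getD cnt 0))
              (s2.getD cnt 0) then
          pvLoopA s1 s2 k
            (if (cl.eraseIdx i).isEmpty then ((cnt : Nat) : Int)
             else PySem.List.pyGetD (cl.eraseIdx i) 0 0)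
            (cl.eraseIdx i) true
            (PySem.Set.add (if flag then PySem.Set.empty else cyc) (s1.getD cnt 0))
            (if flag then total + 1 else total)
        else
          pvLoopA s1 s2 k ((pvSig s1 s2 cnt : Nat) : Int) (cl.eraseIdx i) false
            (PySem.Set.add (if flag then PySem.Set.empty else cyc) (s1.getD cnt 0))
            (if flag then total + 1 else total)) := by
      have hE : cl.isEmpty = false := by
        cases cl with
        | nil => exact absurd rfl hclne
        | cons a t => rfl
      conv_lhs => rw [pvLoopA]
      simp only [hE, Bool.false_eq_true, if_false, hi, PySem.List.pop?_natCast cl i hilt,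
        hget1, hget2, hsgidx]
    -- the membership structure of the current cycle set
    have hmem2 : ∀ w, w ∈ PySem.Set.add (if flag then PySem.Set.empty else cyc) (s1.getD cnt 0) ↔
        ((∃ c ∈ C, s1.getD c 0 = w) ∨ w = s1.getD cnt 0) := by
      intro w
      rw [PySem.Set.mem_add]
      cases flag
      · rw [if_neg (by simp)]
        have hch := inv.hcyc rfl w
        rw [← PySem.Set.contains_iff] at *
        constructor
        · rintro (h | h)
          · exact Or.inl (hch.mp h)
          · exact Or.inr h
        · rintro (h | h)
          · exact Or.inl (hch.mpr h)
          · exact Or.inr h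
      · rw [if_pos rfl, inv.hflagC rfl]
        simp [PySem.Set.empty]
    -- A's closing test equals "σ(cnt) already visited after marking cnt"
    have htests : PySem.Set.contains
          (PySem.Set.add (if flag then PySem.Set.empty else cyc) (s1.getD cnt 0))
          (s2.getD cnt 0) =
        (visited.set cnt true).getD (pvSig s1 s2 cnt) false := by
      rw [Bool.eq_iff_iff, PySem.Set.contains_iff, hmem2]
      rw [show ((visited.set cnt true).getD (pvSig s1 s2 cnt) false = true) ↔
            (cnt = pvSig s1 s2 cnt ∨ visited.getD (pvSig s1 s2 cnt) false = true) from by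
        rw [hgetD']
        by_cases h : cnt = pvSig s1 s2 cnt
        · rw [if_pos h]
          exact ⟨fun _ => Or.inl h, fun _ => rfl⟩
        · rw [if_neg h]
          exact ⟨fun hv => Or.inr hv, fun hv => hv.resolve_left h⟩]
      constructor
      · rintro (⟨c, hc, hcv⟩ | hvv)
        · have hceq : c = pvSig s1 s2 cnt :=
            pv_getD_inj s1 hnd c _ (inv.hC c hc).1 hsglt (by rw [hcv, hsgval])
          exact Or.inr ((hceq ▸ (inv.hC c hc).2))
        · have : pvSig s1 s2 cnt = cnt :=
            pv_getD_inj s1 hnd _ cnt hsglt inv.hcnt (by rw [hsgval, hvv])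
          exact Or.inl this.symm
      · rintro (h | h)
        · exact Or.inr (by rw [← hsgval, ← h])
        · by_cases hC : pvSig s1 s2 cnt ∈ C
          · exact Or.inl ⟨_, hC, hsgval⟩
          · exfalso
            have hback := pv_closed_back s1.length (pvSig s1 s2)
              (fun x hx y hy => pv_sig_inj s1 s2 hnd hlen hnd2 hsub x y hx hy)
              (fun x => x < s1.length ∧ visited.getD x false = true ∧ x ∉ C)
              (fun x hx => hx.1)
              (fun x hx => ⟨(pv_sig_spec s1 s2 hlen hnd2 hsub x hx.1).2.1,
                (inv.hV x hx.1 hx.2.1 hx.2.2).1, (inv.hV x hx.1 hx.2.1 hx.2.2).2⟩)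
              cnt inv.hcnt ⟨hsglt, h, hC⟩
            exact absurd hback.2.1 (by rw [inv.hcntvis]; simp)
    -- the accounting step: marking cnt removes one unvisited minimum iff a new cycle just started
    have haccount : total + (pvM s1 s2 visited : Int) =
        (if flag then total + 1 else total) + (pvM s1 s2 (visited.set cnt true) : Int) := by
      cases flag
      · -- mid-cycle: cnt is not its orbit minimum (the minimum r is already visited)
        have hm := inv.hmin
        rw [if_neg (by simp)] at hm
        obtain ⟨r, hrn, hrv, ⟨s, hsn, hs⟩, hrle⟩ := hm
        have hmf : pvIsMinB s1 s2 cnt = false := by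
          by_contra hcon
          have hT : pvIsMinB s1 s2 cnt = true := by
            cases h : pvIsMinB s1 s2 cnt
            · exact absurd h hcon
            · rfl
          have h1 : cnt ≤ r := hs ▸ (pv_isMinB_iff s1 s2 cnt).mp hT s hsn
          have h2 : r ≤ cnt := by
            have := hrle 0 hn0
            simpa using this
          have : r = cnt := by omega
          rw [this, inv.hcntvis] at hrv
          exact absurd hrv (by simp)
        rw [if_neg (by simp), pv_M_set_false s1 s2 visited cnt inv.hcnt hvlen hmf]
      · -- new cycle: cnt is its orbit minimum
        have hm := inv.hmin
        rw [if_pos rfl] at hm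
        have hmt : pvIsMinB s1 s2 cnt = true := (pv_isMinB_iff s1 s2 cnt).mpr hm
        rw [if_pos rfl, pv_M_set_true s1 s2 visited cnt inv.hcnt hvlen inv.hcntvis hmt]
        push_cast
        ring
    rw [hAstep, htests]
    by_cases hb : (visited.set cnt true).getD (pvSig s1 s2 cnt) false = true
    · -- the current cycle closes
      rw [if_pos hb]
      by_cases hclE0 : cl.eraseIdx i = []
      · -- cnt_list exhausted: everything is visited
        have hall : ∀ x, x < s1.length → (visited.set cnt true).getD x false = true := by
          intro x hx
          have hfe : ((List.range s1.length).filter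
              (fun x => !((visited.set cnt true).getD x false))) = [] := by
            have := hclE ▸ hclE0
            exact List.map_eq_nil_iff.mp this
          have := List.filter_eq_nil_iff.mp hfe x (List.mem_range.mpr hx)
          simpa using this
        have hIH := IH ((cnt : Nat) : Int) (cl.eraseIdx i) true
          (PySem.Set.add (if flag then PySem.Set.empty else cyc) (s1.getD cnt 0))
          (if flag then total + 1 else total) (visited.set cnt true) hcl'len
          (Or.inl ⟨hclE0, pv_M_zero s1 s2 _ hall⟩)
        rw [if_pos (by simp [hclE0]), hIH, haccount]
      · -- a fresh cycle starts at the least remaining index r'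
        have hVnew : ∀ x, x < s1.length → (visited.set cnt true).getD x false = true →
            (visited.set cnt true).getD (pvSig s1 s2 x) false = true := by
          intro x hx hvx
          rw [hgetD'] at hvx
          by_cases hxc : cnt = x
          · subst hxc
            rw [hgetD'] at hb
            rcases (by split_ifs at hb with h <;> [exact Or.inl h; exact Or.inr hb] :
                cnt = pvSig s1 s2 cnt ∨ visited.getD (pvSig s1 s2 cnt) false = true) with h | h
            · rw [← h]; exact hviscnt'
            · exact hmono _ h
          · rw [if_neg hxc] at hvx
            by_cases hxC : x ∈ C
            · rcases inv.hchain x hxC with h | h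
              · exact hmono _ (inv.hC _ h).2
              · rw [h]; exact hviscnt'
            · exact hmono _ (inv.hV x hx hvx hxC).1
        -- the complement of visited' is closed under σ
        have hUc : ∀ x, x < s1.length → (visited.set cnt true).getD x false = false →
            (visited.set cnt true).getD (pvSig s1 s2 x) false = false := by
          intro x hx hxv
          by_contra hcon
          have hvt : (visited.set cnt true).getD (pvSig s1 s2 x) false = true := by
            cases h : (visited.set cnt true).getD (pvSig s1 s2 x) false
            · exact absurd h hcon
            · rfl
          have hback := pv_closed_back s1.length (pvSig s1 s2)
            (fun a hA b hB => pv_sig_inj s1 s2 hnd hlen hnd2 hsub a b hA hB)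
            (fun y => y < s1.length ∧ (visited.set cnt true).getD y false = true)
            (fun y hy => hy.1)
            (fun y hy => ⟨(pv_sig_spec s1 s2 hlen hnd2 hsub y hy.1).2.1, hVnew y hy.1 hy.2⟩)
            x hx ⟨(pv_sig_spec s1 s2 hlen hnd2 hsub x hx).2.1, hvt⟩
          rw [hback.2] at hxv
          exact absurd hxv (by simp)
        -- name the least remaining index r'
        have hfne : ((List.range s1.length).filter
            (fun x => !((visited.set cnt true).getD x false))) ≠ [] := by
          intro h
          exact hclE0 (by rw [hclE, h]; rfl)
        obtain ⟨r', hh⟩ : ∃ r', ((List.range s1.length).filter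
            (fun x => !((visited.set cnt true).getD x false))).head? = some r' := by
          cases hl : (List.range s1.length).filter
              (fun x => !((visited.set cnt true).getD x false)) with
          | nil => exact absurd hl hfne
          | cons a t => exact ⟨a, rfl⟩
        obtain ⟨hr'n, hr'p, hr'least⟩ := pv_filter_range_head_least _ _ _ hh
        have hr'unvis : (visited.set cnt true).getD r' false = false := by
          cases h : (visited.set cnt true).getD r' false
          · rfl
          · rw [h] at hr'p; simp at hr'p
        have hgd : PySem.List.pyGetD (cl.eraseIdx i) 0 0 = ((r' : Nat) : Int) := by
          rw [PySem.List.pyGetD_zero, hclE, List.getD_eq_getElem?_getD,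
              ← List.head?_eq_getElem?, List.head?_map, hh]
          rfl
        -- the whole orbit of r' is unvisited, so r' (the least unvisited index) is its minimum
        have hOrb : ∀ k, (pvSig s1 s2)^[k] r' < s1.length ∧
            (visited.set cnt true).getD ((pvSig s1 s2)^[k] r') false = false := by
          intro k
          induction k with
          | zero => exact ⟨hr'n, hr'unvis⟩
          | succ k ih =>
            rw [Function.iterate_succ_apply']
            exact ⟨(pv_sig_spec s1 s2 hlen hnd2 hsub _ ih.1).2.1, hUc _ ih.1 ih.2⟩
        have hminr' : ∀ k, k < s1.length → r' ≤ (pvSig s1 s2)^[k] r' := by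
          intro k _
          exact hr'least _ (hOrb k).1 (by rw [(hOrb k).2]; rfl)
        have hIH := IH ((r' : Nat) : Int) (cl.eraseIdx i) true
          (PySem.Set.add (if flag then PySem.Set.empty else cyc) (s1.getD cnt 0))
          (if flag then total + 1 else total) (visited.set cnt true) hcl'len
          (Or.inr ⟨r', rfl, [], by
            refine ⟨hvlen', hclE, ?_, ?_, fun _ => rfl, ?_, ?_, hr'n, hr'unvis, ?_⟩
            · intro c hc; exact absurd hc (List.not_mem_nil)
            · intro c hc; exact absurd hc (List.not_mem_nil)
            · intro hcon; exact absurd hcon (by simp)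
            · intro x hx hvx _
              exact ⟨hVnew x hx hvx, List.not_mem_nil⟩
            · rw [if_pos rfl]
              exact hminr'⟩)
        rw [if_neg (show ¬((cl.eraseIdx i).isEmpty = true) from by simp [hclE0]), hgd,
            hIH, haccount]
    · -- the walk continues to σ(cnt)
      rw [if_neg hb]
      rw [hgetD'] at hb
      have hsgne : cnt ≠ pvSig s1 s2 cnt := by
        intro h; rw [if_pos h] at hb; exact hb rfl
      rw [if_neg hsgne] at hb
      have hsgnv : visited.getD (pvSig s1 s2 cnt) false = false := by
        cases hvb : visited.getD (pvSig s1 s2 cnt) false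
        · rfl
        · exact absurd hvb hb
      have hsgC : pvSig s1 s2 cnt ∉ C := fun h => hb (inv.hC _ h).2
      obtain ⟨p, hp1, hpn, hfix⟩ := pv_period s1 s2 hnd hlen hnd2 hsub cnt inv.hcnt
      have hIH := IH ((pvSig s1 s2 cnt : Nat) : Int) (cl.eraseIdx i) false
        (PySem.Set.add (if flag then PySem.Set.empty else cyc) (s1.getD cnt 0))
        (if flag then total + 1 else total) (visited.set cnt true) hcl'len
        (Or.inr ⟨pvSig s1 s2 cnt, rfl, C ++ [cnt], by
          refine ⟨hvlen', hclE, ?_, ?_, by simp, ?_, ?_, hsglt, ?_, ?_⟩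
          · -- hC
            intro c hc
            rcases List.mem_append.mp hc with h | h
            · exact ⟨(inv.hC c h).1, hmono _ (inv.hC c h).2⟩
            · rw [List.mem_singleton.mp h]
              exact ⟨inv.hcnt, hviscnt'⟩
          · -- hchain
            intro c hc
            rcases List.mem_append.mp hc with h | h
            · rcases inv.hchain c h with h' | h'
              · exact Or.inl (List.mem_append.mpr (Or.inl h'))
              · exact Or.inl (List.mem_append.mpr (Or.inr (by simp [h'])))
            · rw [List.mem_singleton.mp h]
              exact Or.inr rfl
          · -- hcyc
            intro _ v
            rw [PySem.Set.contains_iff, hmem2]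
            constructor
            · rintro (⟨c, hc, hcv⟩ | h)
              · exact ⟨c, List.mem_append.mpr (Or.inl hc), hcv⟩
              · exact ⟨cnt, List.mem_append.mpr (Or.inr (by simp)), h.symm⟩
            · rintro ⟨c, hc, hcv⟩
              rcases List.mem_append.mp hc with h | h
              · exact Or.inl ⟨c, h, hcv⟩
              · rw [List.mem_singleton.mp h] at hcv
                exact Or.inr hcv.symm
          · -- hV
            intro x hx hvx hxC
            have hxC' : x ∉ C := fun h => hxC (List.mem_append.mpr (Or.inl h))
            have hxcnt : x ≠ cnt := fun h => hxC (List.mem_append.mpr (Or.inr (by simp [h])))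
            rw [hgetD', if_neg (fun h => hxcnt h.symm)] at hvx
            obtain ⟨hv1, hv2⟩ := inv.hV x hx hvx hxC'
            refine ⟨hmono _ hv1, ?_⟩
            intro hmem
            rcases List.mem_append.mp hmem with h | h
            · exact hv2 h
            · rw [List.mem_singleton.mp h] at hv1
              exact absurd hv1 (by rw [inv.hcntvis]; simp)
          · -- hcntvis for new cnt = σ cnt
            rw [hgetD', if_neg hsgne]
            exact hsgnv
          · -- hmin for the continued cycle
            rw [if_neg (by simp)]
            cases hflag : flag
            · -- flag was false: keep the old witness r
              have hm := inv.hmin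
              rw [hflag, if_neg (by simp)] at hm
              obtain ⟨r, hrn, hrv, ⟨s, hsn, hs⟩, hrle⟩ := hm
              have hs1 : 1 ≤ s := by
                rcases Nat.eq_zero_or_pos s with h0 | h0
                · exfalso
                  rw [h0] at hs
                  simp only [Function.iterate_zero, id_eq] at hs
                  rw [← hs, inv.hcntvis] at hrv
                  exact absurd hrv (by simp)
                · exact h0
              refine ⟨r, hrn, hmono _ hrv, ⟨s - 1, by omega, ?_⟩, ?_⟩
              · rw [← Function.iterate_succ_apply, Nat.succ_eq_add_one,
                    show (s - 1) + 1 = s from by omega]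
                exact hs
              · intro j _
                rw [← Function.iterate_succ_apply]
                exact pv_le_all s1 s2 hnd hlen hnd2 hsub cnt r inv.hcnt hrle (j + 1)
            · -- flag was true: cnt itself becomes the visited minimum
              have hm := inv.hmin
              rw [hflag, if_pos rfl] at hm
              refine ⟨cnt, inv.hcnt, hviscnt', ⟨p - 1, by omega, ?_⟩, ?_⟩
              · rw [← Function.iterate_succ_apply, Nat.succ_eq_add_one,
                    show (p - 1) + 1 = p from by omega]
                exact hfix
              · intro j _
                rw [← Function.iterate_succ_apply]
                exact pv_le_all s1 s2 hnd hlen hnd2 hsub cnt cnt inv.hcnt hm (j + 1)⟩)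
      rw [hIH, haccount]

-- B's inner while-loop: starting from the u-th iterate it runs to the first iterate ≤ i.
lemma pv_walk_aux (s1 s2 : List Int) (hnd : s1.Nodup) (hlen : s1.length ≤ s2.length)
    (hnd2 : (s2.take s1.length).Nodup) (hsub : ∀ v ∈ s2.take s1.length, v ∈ s1)
    (i : Nat) (hi : i < s1.length) (t : Nat) (ht1 : 1 ≤ t)
    (htle : (pvSig s1 s2)^[t] i ≤ i)
    (hmin' : ∀ s, 1 ≤ s → s < t → i < (pvSig s1 s2)^[s] i) :
    ∀ (f u : Nat), 1 ≤ u → u ≤ t → t ≤ u + f →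
      pvWalkB s2 (pvPos s1) (i : Int) f (((pvSig s1 s2)^[u] i : Nat) : Int) =
        some ((((pvSig s1 s2)^[t] i : Nat)) : Int) := by
  intro f
  induction f with
  | zero =>
    intro u hu1 hut htuf
    have hut' : u = t := by omega
    subst hut'
    rw [pvWalkB]
  | succ f ih =>
    intro u hu1 hut htuf
    by_cases hu : u = t
    · subst hu
      rw [pvWalkB, if_neg (by exact_mod_cast Nat.not_lt.mpr htle)]
    · have hult : u < t := by omega
      have hgt : i < (pvSig s1 s2)^[u] i := hmin' u hu1 hult
      have hxlt : (pvSig s1 s2)^[u] i < s1.length := pv_iter_lt s1 s2 hlen hnd2 hsub u i hi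
      have hxlt2 : (pvSig s1 s2)^[u] i < s2.length := lt_of_lt_of_le hxlt hlen
      have hget : PySem.List.pyGet? s2 (((pvSig s1 s2)^[u] i : Nat) : Int) =
          some (s2.getD ((pvSig s1 s2)^[u] i) 0) := by
        rw [PySem.List.pyGet?_natCast, List.getElem?_eq_getElem hxlt2,
            List.getD_eq_getElem?_getD, List.getElem?_eq_getElem hxlt2]
        rfl
      have hpos : (pvPos s1).get? (s2.getD ((pvSig s1 s2)^[u] i) 0) =
          some (((pvSig s1 s2)^[u+1] i : Nat) : Int) := by
        rw [pv_pos_get s1 hnd, (pv_sig_spec s1 s2 hlen hnd2 hsub _ hxlt).1,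
            Function.iterate_succ_apply']
        rfl
      rw [pvWalkB, if_pos (by exact_mod_cast hgt)]
      simp only [hget, hpos]
      exact ih (u + 1) (by omega) (by omega) (by omega)

-- the body of B's for-loop adds 1 exactly when i is minimal on its orbit
lemma pv_step_eval (s1 s2 : List Int) (hnd : s1.Nodup) (hlen : s1.length ≤ s2.length)
    (hnd2 : (s2.take s1.length).Nodup) (hsub : ∀ v ∈ s2.take s1.length, v ∈ s1)
    (c : Int) (i : Nat) (hi : i < s1.length) :
    pvStepB s2 (pvPos s1) s1.length (some c) i =
      some (c + if pvIsMinB s1 s2 i then 1 else 0) := by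
  have hi2 : i < s2.length := lt_of_lt_of_le hi hlen
  have hget : PySem.List.pyGet? s2 (i : Int) = some (s2.getD i 0) := by
    rw [PySem.List.pyGet?_natCast, List.getElem?_eq_getElem hi2,
        List.getD_eq_getElem?_getD, List.getElem?_eq_getElem hi2]
    rfl
  have hpos : (pvPos s1).get? (s2.getD i 0) = some (((pvSig s1 s2)^[1] i : Nat) : Int) := by
    rw [pv_pos_get s1 hnd, (pv_sig_spec s1 s2 hlen hnd2 hsub i hi).1, Function.iterate_one]
    rfl
  obtain ⟨p, hp1, hpn, hfix⟩ := pv_period s1 s2 hnd hlen hnd2 hsub i hi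
  have hex : ∃ t, 1 ≤ t ∧ (pvSig s1 s2)^[t] i ≤ i := ⟨p, hp1, le_of_eq hfix⟩
  classical
  let t := Nat.find hex
  have hts := Nat.find_spec hex
  have htle : t ≤ p := Nat.find_min' hex ⟨hp1, le_of_eq hfix⟩
  have hmin' : ∀ s, 1 ≤ s → s < t → i < (pvSig s1 s2)^[s] i := by
    intro s hs1 hst
    have := Nat.find_min hex hst
    simp only [not_and, Nat.not_le] at this
    exact this hs1
  have hwalk := pv_walk_aux s1 s2 hnd hlen hnd2 hsub i hi t hts.1 hts.2 hmin'
    s1.length 1 (le_refl 1) (by omega) (by omega)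
  rw [Function.iterate_one] at hwalk
  rw [pvStepB]
  simp only [hget, hpos, Function.iterate_one, hwalk]
  congr 1
  by_cases hM : pvIsMinB s1 s2 i = true
  · -- i is the minimum: the walk stops exactly at i
    have hall := pv_le_all s1 s2 hnd hlen hnd2 hsub i i hi ((pv_isMinB_iff s1 s2 i).mp hM)
    have hfixt : (pvSig s1 s2)^[t] i = i := le_antisymm hts.2 (hall t)
    simp [hM, hfixt]
  · -- i is not the minimum: the walk stops strictly below i
    have hMf : pvIsMinB s1 s2 i = false := by
      cases h : pvIsMinB s1 s2 i
      · rfl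
      · exact absurd h hM
    have hne : (pvSig s1 s2)^[t] i ≠ i := by
      intro hfixt
      apply hM
      rw [pv_isMinB_iff]
      intro k _
      rw [pv_iter_mod s1 s2 i t hts.1 hfixt k]
      rcases Nat.eq_zero_or_pos (k % t) with h0 | h0
      · rw [h0]
        simp
      · exact le_of_lt (hmin' _ h0 (Nat.mod_lt _ (by omega)))
    have hne' : (((pvSig s1 s2)^[t] i : Nat) : Int) ≠ (i : Int) := by exact_mod_cast hne
    simp [hMf, hne']

lemma pv_fold (s1 s2 : List Int) (hnd : s1.Nodup) (hlen : s1.length ≤ s2.length)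
    (hnd2 : (s2.take s1.length).Nodup) (hsub : ∀ v ∈ s2.take s1.length, v ∈ s1) :
    ∀ (m : Nat), m ≤ s1.length →
      (List.range m).foldl (pvStepB s2 (pvPos s1) s1.length) (some 0) =
        some ((((List.range m).filter (pvIsMinB s1 s2)).length : Nat) : Int) := by
  intro m
  induction m with
  | zero => intro _; simp
  | succ m ih =>
    intro hm
    rw [List.range_succ, List.foldl_append, ih (by omega), List.filter_append,
        List.length_append]
    simp only [List.foldl_cons, List.foldl_nil]
    rw [pv_step_eval s1 s2 hnd hlen hnd2 hsub _ m (by omega)]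
    by_cases hM : pvIsMinB s1 s2 m = true
    · simp [hM]
    · have hMf : pvIsMinB s1 s2 m = false := by
        cases h : pvIsMinB s1 s2 m
        · rfl
        · exact absurd h hM
      simp [hMf]

lemma pv_main (s1 s2 : List Int) (hnd : s1.Nodup) (hlen : s1.length ≤ s2.length)
    (hnd2 : (s2.take s1.length).Nodup) (hsub : ∀ v ∈ s2.take s1.length, v ∈ s1) :
    number_of_cycles s1 s2 = number_of_cycles_alt s1 s2 := by
  have hlen0 : (PySem.List.pyRange 0 (s1.length : Int) 1).length = s1.length := by
    rw [PySem.List.length_pyRange_one]; simp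
  have hrep : ∀ x : Nat, (List.replicate s1.length false).getD x false = false := by
    intro x
    rw [List.getD_eq_getElem?_getD, List.getElem?_replicate]
    split_ifs <;> rfl
  have hA := pv_count s1 s2 hnd hlen hnd2 hsub s1.length 0 (PySem.List.pyRange 0 s1.length 1)
    true PySem.Set.empty 0 (List.replicate s1.length false) hlen0 (by
      rcases Nat.eq_zero_or_pos s1.length with h0 | hpos
      · left
        refine ⟨?_, ?_⟩
        · rw [h0, PySem.List.pyRange_zero_nat]
          simp
        · unfold pvM
          rw [h0]
          rfl
      · right
        refine ⟨0, by simp, [], ?_⟩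
        refine ⟨by simp, ?_, ?_, ?_, fun _ => rfl, ?_, ?_, hpos, hrep 0, ?_⟩
        · rw [PySem.List.pyRange_zero_nat]
          congr 1
          refine (List.filter_eq_self.mpr (fun a _ => ?_)).symm
          show (!((List.replicate s1.length false).getD a false)) = true
          rw [hrep a]
          rfl
        · intro c hc; exact absurd hc (List.not_mem_nil)
        · intro c hc; exact absurd hc (List.not_mem_nil)
        · intro hcon; exact absurd hcon (by simp)
        · intro x hx hvx
          rw [hrep x] at hvx
          exact absurd hvx (by simp)
        · rw [if_pos rfl]
          intro k _
          exact Nat.zero_le _)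
  have hB := pv_fold s1 s2 hnd hlen hnd2 hsub s1.length (le_refl _)
  have hMeq : pvM s1 s2 (List.replicate s1.length false) =
      ((List.range s1.length).filter (pvIsMinB s1 s2)).length := by
    unfold pvM
    congr 1
    apply List.filter_congr
    intro i _
    rw [hrep i]
    simp
  unfold number_of_cycles number_of_cycles_alt
  rw [hA, hB, hMeq]
  simp

-- ===== VERDICT (by name: the statement is the Claim_ definition above) =====
theorem number_of_cycles_spec : Claim_equal_number_of_cycles := by
  intro s1 s2 _hdom hpre
  exact pv_main s1 s2 hpre.1 hpre.2.1 hpre.2.2.1 hpre.2.2.2
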